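-- pv_equiv track=rewrite | github.com/raisvaza/Algeo02-19060 | src/tbl.py | sortBySim
-- ===== SOURCE A (Python) =====
-- def sortBySim(before):
--     table = [[0 for j in range(len(before[0]))] for i in range (len(before))]
--     # Copy before ke table
--     for i in range(len(table)):
--         for j in range(len(table[0])):
--             table[i][j] = before[i][j]
--
--     indeks_sim = len(table) - 1
--     jumlah_dokumen = len(table[indeks_sim])
--
--     # Metode sorting diri sendiri
--     for i in range(2, jumlah_dokumen):
--         for j in range(i+1, jumlah_dokumen):
--             if table[indeks_sim][j] > table[indeks_sim][i]:
--                 temp = table[indeks_sim][i]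
--                 table[indeks_sim][i] = table[indeks_sim][j]
--                 table[indeks_sim][j] = temp
--                 for k in range(0, indeks_sim):
--                     temp = table[k][i]
--                     table[k][i] = table[k][j]
--                     table[k][j] = temp
--     return table
-- ===== SOURCE B (Python) =====
-- def sortBySim(before):
--     ncols = len(before[0])
--     # Run the same exchange sort on a copy of the key (last) row, tracking
--     # the column permutation, then reorder every row's columns in one pass.
--     key = [before[-1][j] for j in range(ncols)]
--     perm = list(range(ncols))
--     for i in range(2, ncols):
--         for j in range(i + 1, ncols):
--             if key[j] > key[i]:
--                 key[i], key[j] = key[j], key[i]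
--                 perm[i], perm[j] = perm[j], perm[i]
--     return [[row[p] for p in perm] for row in before]
-- ===== Notes on version B (the rewrite author's own statement) =====
-- stated objective: faster
-- what changed: Instead of swapping whole columns across every row inside the quadratic exchange-sort inner loop, B runs the same exchange sort only on a copy of the key (last) row while tracking the column permutation, and then reorders each row's columns in a single pass.
import Mathlib
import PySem

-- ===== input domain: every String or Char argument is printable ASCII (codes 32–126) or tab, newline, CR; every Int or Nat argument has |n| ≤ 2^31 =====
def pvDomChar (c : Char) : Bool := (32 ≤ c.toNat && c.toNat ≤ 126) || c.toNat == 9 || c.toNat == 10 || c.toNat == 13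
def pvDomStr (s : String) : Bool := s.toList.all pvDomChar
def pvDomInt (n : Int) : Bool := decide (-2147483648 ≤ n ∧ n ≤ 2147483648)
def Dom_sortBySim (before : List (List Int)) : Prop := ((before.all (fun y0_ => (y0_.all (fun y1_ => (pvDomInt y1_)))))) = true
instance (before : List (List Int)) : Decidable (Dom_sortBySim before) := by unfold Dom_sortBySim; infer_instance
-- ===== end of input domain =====

-- B replaces A's exchange sort that swaps whole columns across all rows inside the inner loop
-- by the same exchange sort on the key row alone, tracking the column permutation, followed by
-- one reordering pass over the rows (objective: faster).

-- ===== PORT A =====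
-- table[i][j] read/write (indices here are loop counters from range(), always ≥ 0)
def pvGet2 (t : List (List Int)) (i j : Nat) : Int := (t.getD i []).getD j 0
def pvSet2 (t : List (List Int)) (i j : Nat) (v : Int) : List (List Int) :=
  t.modify i (fun row => row.set j v)

-- the body of A's `if`: swap key-row entries i,j, then columns i,j of rows 0..indeks-1
def pvAswap (indeks i j : Nat) (t : List (List Int)) : List (List Int) :=
  let temp := pvGet2 t indeks i
  let t1 := pvSet2 t indeks i (pvGet2 t indeks j)
  let t2 := pvSet2 t1 indeks j temp
  (List.range indeks).foldl (fun t k =>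
    let temp := pvGet2 t k i
    let t1 := pvSet2 t k i (pvGet2 t k j)
    pvSet2 t1 k j temp) t2

def sortBySim (before : List (List Int)) : List (List Int) :=
  let nrows := before.length
  let ncols := (before.headD []).length
  let table0 : List (List Int) :=
    (List.range nrows).map (fun _ => (List.range ncols).map (fun _ => (0 : Int)))
  -- Copy before ke table
  let table1 := (List.range nrows).foldl (fun t i =>
    (List.range ncols).foldl (fun t j => pvSet2 t i j (pvGet2 before i j)) t) table0
  let indeks := nrows - 1
  let jum := (table1.getD indeks []).length
  -- Metode sorting diri sendiri
  (List.range' 2 (jum - 2)).foldl (fun t i =>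
    (List.range' (i + 1) (jum - (i + 1))).foldl (fun t j =>
      if pvGet2 t indeks j > pvGet2 t indeks i then pvAswap indeks i j t else t) t) table1

-- ===== PORT B =====
-- one comparison/swap step on the (key, perm) pair
def pvBstep (i j : Nat) (kp : List Int × List Nat) : List Int × List Nat :=
  if kp.1.getD j 0 > kp.1.getD i 0 then
    ((kp.1.set i (kp.1.getD j 0)).set j (kp.1.getD i 0),
     (kp.2.set i (kp.2.getD j 0)).set j (kp.2.getD i 0))
  else kp

def sortBySim_alt (before : List (List Int)) : List (List Int) :=
  let ncols := (before.headD []).length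
  let last := before.getLastD []
  let kp := (List.range' 2 (ncols - 2)).foldl (fun kp i =>
      (List.range' (i + 1) (ncols - (i + 1))).foldl (fun kp j => pvBstep i j kp) kp)
    ((List.range ncols).map (fun j => last.getD j 0), List.range ncols)
  before.map (fun row => kp.2.map (fun p => row.getD p 0))

-- ===== PRECONDITION & SPEC =====
-- Pre_ excludes exactly the inputs where Python A raises IndexError: the empty table
-- (before[0]) and tables whose later rows are shorter than row 0 (before[i][j] in the copy loop).
def Pre_sortBySim (before : List (List Int)) : Prop :=
  before ≠ [] ∧ ∀ row ∈ before, (before.headD []).length ≤ row.length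
instance (before : List (List Int)) : Decidable (Pre_sortBySim before) := by
  unfold Pre_sortBySim; infer_instance

def pvWitness_sortBySim : List (List Int) := [[1, 2, 3, 4], [0, 0, 2, 9]]

def Spec_sortBySim (before : List (List Int)) (out : List (List Int)) : Prop := out = sortBySim_alt before
instance (before : List (List Int)) (out : List (List Int)) : Decidable (Spec_sortBySim before out) := by unfold Spec_sortBySim; infer_instance

-- ===== CLAIM (what is proved, stated in full; the proofs are below) =====
def Claim_equal_sortBySim : Prop := ∀ (before : List (List Int)), Dom_sortBySim before → Pre_sortBySim before → Spec_sortBySim before (sortBySim before)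

-- ===== LEMMAS AND PROOFS =====

-- the column swap of entries i and j, as a pure function on one list
def pvSwap {α : Type} (d : α) (i j : Nat) (l : List α) : List α :=
  (l.set i (l.getD j d)).set j (l.getD i d)

theorem pv_length_setfold (m : Nat) (v : Nat → Int) (row : List Int) :
    ((List.range m).foldl (fun r j => r.set j (v j)) row).length = row.length := by
  induction m generalizing row with
  | zero => simp
  | succ m ih => simp [List.range_succ, ih]

theorem pv_getElem?_setfold (m : Nat) (v : Nat → Int) (row : List Int) (k : Nat) :
    ((List.range m).foldl (fun r j => r.set j (v j)) row)[k]? =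
      if k < m ∧ k < row.length then some (v k) else row[k]? := by
  induction m generalizing row with
  | zero => simp
  | succ m ih =>
    simp only [List.range_succ, List.foldl_append, List.foldl_cons, List.foldl_nil]
    rw [List.getElem?_set]
    rw [pv_length_setfold, ih]
    by_cases hk : k < row.length
    · split_ifs with h1 h2 h3 h4 <;>
        first
          | (subst h1; rfl)
          | omega
          | rfl
    · have hnone : row[k]? = none := List.getElem?_eq_none (by omega)
      split_ifs <;> simp_all

theorem pv_setfold_eq_map (m : Nat) (v : Nat → Int) (row : List Int) (h : row.length = m) :
    (List.range m).foldl (fun r j => r.set j (v j)) row = (List.range m).map v := by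
  apply List.ext_getElem?
  intro k
  rw [pv_getElem?_setfold]
  by_cases hk : k < m
  · simp [hk, h]
  · have h1 : (List.range m)[k]? = none := List.getElem?_eq_none (by simpa using hk)
    have h2 : row[k]? = none := List.getElem?_eq_none (by rw [h]; omega)
    simp [hk, h2]

theorem pv_getElem?_modfold (m : Nat) (g : Nat → List Int → List Int)
    (t : List (List Int)) (r : Nat) :
    ((List.range m).foldl (fun t k => t.modify k (g k)) t)[r]? =
      if r < m then (t[r]?).map (g r) else t[r]? := by
  induction m generalizing t with
  | zero => simp
  | succ m ih =>
    simp only [List.range_succ, List.foldl_append, List.foldl_cons, List.foldl_nil]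
    rw [List.getElem?_modify, ih]
    by_cases hr : r < m
    · have hne : m ≠ r := by omega
      simp only [hr, if_true, show r < m + 1 by omega, hne, if_false]
      cases t[r]? <;> simp
    · by_cases he : r = m
      · subst he
        simp only [hr, if_false, show r < r + 1 by omega, if_true]
        cases t[r]? <;> simp
      · have hne : m ≠ r := by omega
        simp only [hr, hne, show ¬ r < m + 1 by omega, if_false]
        cases t[r]? <;> simp

-- A's per-row exchange (read temp, set i, set j) is `modify` with the pure swap
theorem pv_step_eq_modify (k i j : Nat) (t : List (List Int)) :
    pvSet2 (pvSet2 t k i (pvGet2 t k j)) k j (pvGet2 t k i) = t.modify k (pvSwap 0 i j) := by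
  apply List.ext_getElem?
  intro r
  simp only [pvSet2, List.getElem?_modify]
  cases hcell : t[r]? with
  | none => simp
  | some row =>
    by_cases hk : k = r
    · subst hk
      simp [pvGet2, pvSwap, List.getD_eq_getElem?_getD, hcell]
    · simp [hk]

theorem pv_aswap_eq_map (indeks i j : Nat) (t : List (List Int)) (h : t.length = indeks + 1) :
    pvAswap indeks i j t = t.map (pvSwap 0 i j) := by
  show (List.range indeks).foldl
      (fun t k => pvSet2 (pvSet2 t k i (pvGet2 t k j)) k j (pvGet2 t k i))
      (pvSet2 (pvSet2 t indeks i (pvGet2 t indeks j)) indeks j (pvGet2 t indeks i))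
      = t.map (pvSwap 0 i j)
  rw [pv_step_eq_modify indeks i j t]
  have hbody := PySem.List.foldl_congr_mem (List.range indeks)
    (fun t k => pvSet2 (pvSet2 t k i (pvGet2 t k j)) k j (pvGet2 t k i))
    (fun t k => t.modify k (pvSwap 0 i j))
    (t.modify indeks (pvSwap 0 i j))
    (by intro a x _; exact pv_step_eq_modify x i j a)
  rw [hbody]
  apply List.ext_getElem?
  intro r
  rw [pv_getElem?_modfold, List.getElem?_modify, List.getElem?_map]
  by_cases hr : r < indeks
  · have hne : ¬ indeks = r := by omega
    simp only [hr, if_true, hne, if_false]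
    cases t[r]? <;> simp
  · by_cases he : r = indeks
    · subst he
      simp only [hr, if_false, if_true]
      cases t[r]? <;> simp
    · have h1 : t[r]? = none := List.getElem?_eq_none (by omega)
      simp [hr, h1]

-- swapping entries of a mapped list = mapping the swapped list (in-range indices)
theorem pv_swap_map (i j : Nat) (perm : List Nat) (g : Nat → Int)
    (hi : i < perm.length) (hj : j < perm.length) :
    pvSwap 0 i j (perm.map g) = (pvSwap 0 i j perm).map g := by
  unfold pvSwap
  have hdi : (perm.map g).getD i 0 = g (perm.getD i 0) := by
    simp [List.getD_eq_getElem?_getD, List.getElem?_eq_getElem hi]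
  have hdj : (perm.map g).getD j 0 = g (perm.getD j 0) := by
    simp [List.getD_eq_getElem?_getD, List.getElem?_eq_getElem hj]
  rw [hdi, hdj, ← List.map_set, ← List.map_set]

-- composition of two modifies at the same index
theorem pv_modify_modify (i : Nat) (f g : List Int → List Int) (t : List (List Int)) :
    (t.modify i f).modify i g = t.modify i (fun r => g (f r)) := by
  apply List.ext_getElem?
  intro r
  simp only [List.getElem?_modify]
  cases t[r]? <;> by_cases hk : i = r <;> simp [hk]

-- the inner copy loop only modifies row i
theorem pv_setfold_modify (m i : Nat) (c : Nat → Int) (t : List (List Int)) :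
    (List.range m).foldl (fun t j => pvSet2 t i j (c j)) t
      = t.modify i (fun row => (List.range m).foldl (fun r j => r.set j (c j)) row) := by
  induction m generalizing t with
  | zero =>
    simp only [List.range_zero, List.foldl_nil]
    apply List.ext_getElem?
    intro r
    simp only [List.getElem?_modify]
    cases t[r]? <;> by_cases hk : i = r <;> simp [hk]
  | succ m ih =>
    simp only [List.range_succ, List.foldl_append, List.foldl_cons, List.foldl_nil, ih]
    rw [pvSet2, pv_modify_modify]

-- last cell of a nonempty list through getElem?
theorem pv_getElem?_last {α : Type} (l : List α) (d : α) (h : l ≠ []) :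
    l[l.length - 1]? = some (l.getLastD d) := by
  rw [← List.getLast?_eq_getElem?, List.getLastD_eq_getLast?]
  cases hc : l.getLast? with
  | none => exact absurd (List.getLast?_eq_none_iff.mp hc) h
  | some x => simp

-- the copy phase of A produces `before` with every row read through getD at columns 0..ncols-1
theorem pv_copy_phase (before : List (List Int)) :
    ((List.range before.length).foldl (fun t i =>
      (List.range (before.headD []).length).foldl
        (fun t j => pvSet2 t i j (pvGet2 before i j)) t)
      ((List.range before.length).map
        (fun _ => (List.range (before.headD []).length).map (fun _ => (0 : Int)))))
    = before.map (fun row =>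
        (List.range (before.headD []).length).map (fun p => row.getD p 0)) := by
  have hbody2 := PySem.List.foldl_congr_mem (List.range before.length)
    (fun t i => (List.range (before.headD []).length).foldl
        (fun t j => pvSet2 t i j (pvGet2 before i j)) t)
    (fun t i => t.modify i (fun row => (List.range (before.headD []).length).foldl
        (fun r j => r.set j (pvGet2 before i j)) row))
    ((List.range before.length).map
        (fun _ => (List.range (before.headD []).length).map (fun _ => (0 : Int))))
    (by intro acc x _; exact pv_setfold_modify _ x _ acc)
  rw [hbody2]
  apply List.ext_getElem?
  intro r
  rw [pv_getElem?_modfold]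
  by_cases hr : r < before.length
  · rw [if_pos hr]
    have h0 : ((List.range before.length).map
        (fun _ => (List.range (before.headD []).length).map (fun _ => (0 : Int))))[r]?
        = some ((List.range (before.headD []).length).map (fun _ => (0 : Int))) := by
      simp [hr]
    rw [h0, List.getElem?_map, List.getElem?_eq_getElem hr]
    simp only [Option.map_some]
    rw [pv_setfold_eq_map _ _ _ (by simp)]
    refine congrArg some (List.map_congr_left ?_)
    intro p hp
    simp [pvGet2, List.getD_eq_getElem?_getD, List.getElem?_eq_getElem hr]
  · rw [if_neg hr]
    have h0 : ((List.range before.length).map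
        (fun _ => (List.range (before.headD []).length).map (fun _ => (0 : Int))))[r]?
        = none := by
      apply List.getElem?_eq_none
      simpa using hr
    rw [h0, List.getElem?_map, List.getElem?_eq_none (show before.length ≤ r by omega)]
    rfl

-- ==== the loop invariant tying A's table to B's (key, perm) pair ====
def pvInv (before : List (List Int)) (t : List (List Int)) (kp : List Int × List Nat) : Prop :=
  t = before.map (fun row => kp.2.map (fun p => row.getD p 0)) ∧
  kp.1 = kp.2.map (fun p => (before.getLastD []).getD p 0) ∧
  kp.2.length = (before.headD []).length

-- reading A's key row = reading B's key list
theorem pv_keyrow (before : List (List Int)) (h : before ≠ []) (t : List (List Int))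
    (kp : List Int × List Nat) (hinv : pvInv before t kp) :
    t.getD (before.length - 1) [] = kp.1 := by
  obtain ⟨ht, hk, -⟩ := hinv
  have hlast : before[before.length - 1]? = some (before.getLastD []) :=
    pv_getElem?_last before [] h
  rw [ht, List.getD_eq_getElem?_getD, List.getElem?_map, hlast, hk]
  rfl

theorem pv_step_inv (before : List (List Int)) (h : before ≠ []) (i j : Nat)
    (hi : i < (before.headD []).length) (hj : j < (before.headD []).length)
    (t : List (List Int)) (kp : List Int × List Nat) (hinv : pvInv before t kp) :
    pvInv before
      (if pvGet2 t (before.length - 1) j > pvGet2 t (before.length - 1) i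
        then pvAswap (before.length - 1) i j t else t)
      (pvBstep i j kp) := by
  have hkey := pv_keyrow before h t kp hinv
  obtain ⟨ht, hk, hlen⟩ := hinv
  have hcondj : pvGet2 t (before.length - 1) j = kp.1.getD j 0 := by rw [pvGet2, hkey]
  have hcondi : pvGet2 t (before.length - 1) i = kp.1.getD i 0 := by rw [pvGet2, hkey]
  rw [pvBstep, hcondj, hcondi]
  split_ifs with hc
  · have hi2 : i < kp.2.length := by omega
    have hj2 : j < kp.2.length := by omega
    have htlen : t.length = (before.length - 1) + 1 := by
      rw [ht, List.length_map]
      have := List.length_pos_iff.mpr h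
      omega
    refine ⟨?_, ?_, ?_⟩
    · rw [pv_aswap_eq_map _ _ _ _ htlen, ht, List.map_map]
      refine List.map_congr_left ?_
      intro row _
      show pvSwap 0 i j (kp.2.map fun p => row.getD p 0) = _
      rw [pv_swap_map i j kp.2 _ hi2 hj2]
      rfl
    · show (kp.1.set i (kp.1.getD j 0)).set j (kp.1.getD i 0) = _
      have hsw : (kp.1.set i (kp.1.getD j 0)).set j (kp.1.getD i 0) = pvSwap 0 i j kp.1 := rfl
      rw [hsw, hk, pv_swap_map i j kp.2 _ hi2 hj2]
      rfl
    · simpa using hlen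
  · exact ⟨ht, hk, hlen⟩

theorem pv_inner_inv (before : List (List Int)) (h : before ≠ []) (i : Nat)
    (hi : i < (before.headD []).length) (js : List Nat)
    (hjs : ∀ j ∈ js, j < (before.headD []).length)
    (t : List (List Int)) (kp : List Int × List Nat) (hinv : pvInv before t kp) :
    pvInv before
      (js.foldl (fun t j => if pvGet2 t (before.length - 1) j > pvGet2 t (before.length - 1) i
          then pvAswap (before.length - 1) i j t else t) t)
      (js.foldl (fun kp j => pvBstep i j kp) kp) := by
  induction js generalizing t kp with
  | nil => exact hinv
  | cons j js ih =>
    simp only [List.foldl_cons]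
    exact ih (fun x hx => hjs x (List.mem_cons_of_mem _ hx)) _ _
      (pv_step_inv before h i j hi (hjs j List.mem_cons_self) t kp hinv)

theorem pv_outer_inv (before : List (List Int)) (h : before ≠ []) (is : List Nat)
    (his : ∀ i ∈ is, i < (before.headD []).length)
    (t : List (List Int)) (kp : List Int × List Nat) (hinv : pvInv before t kp) :
    pvInv before
      (is.foldl (fun t i =>
        (List.range' (i + 1) ((before.headD []).length - (i + 1))).foldl
          (fun t j => if pvGet2 t (before.length - 1) j > pvGet2 t (before.length - 1) i
            then pvAswap (before.length - 1) i j t else t) t) t)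
      (is.foldl (fun kp i =>
        (List.range' (i + 1) ((before.headD []).length - (i + 1))).foldl
          (fun kp j => pvBstep i j kp) kp) kp) := by
  induction is generalizing t kp with
  | nil => exact hinv
  | cons i is ih =>
    simp only [List.foldl_cons]
    have hi := his i List.mem_cons_self
    refine ih (fun x hx => his x (List.mem_cons_of_mem _ hx)) _ _ ?_
    refine pv_inner_inv before h i hi _ ?_ t kp hinv
    intro j hj
    have := List.mem_range'_1.mp hj
    omega

theorem pv_main (before : List (List Int)) (h : before ≠ []) :
    sortBySim before = sortBySim_alt before := by
  simp only [sortBySim, sortBySim_alt]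
  rw [pv_copy_phase before]
  have hjum : ((before.map (fun row =>
      (List.range (before.headD []).length).map (fun p => row.getD p 0))).getD
        (before.length - 1) []).length = (before.headD []).length := by
    rw [List.getD_eq_getElem?_getD, List.getElem?_map,
      pv_getElem?_last before [] h]
    simp
  rw [hjum]
  have hinit : pvInv before
      (before.map (fun row => (List.range (before.headD []).length).map (fun p => row.getD p 0)))
      ((List.range (before.headD []).length).map (fun j => (before.getLastD []).getD j 0),
        List.range (before.headD []).length) :=
    ⟨rfl, rfl, by simp⟩
  have hfin := pv_outer_inv before h
    (List.range' 2 ((before.headD []).length - 2))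
    (by intro x hx; have := List.mem_range'_1.mp hx; omega)
    _ _ hinit
  exact hfin.1

-- ===== VERDICT (by name: the statement is the Claim_ definition above) =====
theorem sortBySim_spec : Claim_equal_sortBySim := by
  intro before _ hpre
  unfold Spec_sortBySim
  exact pv_main before hpre.1
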